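-- pv_equiv track=rewrite | github.com/hwiards/AdventOfCode2023 | solutions/day13.py | calc_notes
-- ===== SOURCE A (Python) =====
-- def calc_notes(pattern):
--     pattern = pattern.splitlines()
--
--     # horizontal
--     for split_idx in range(1, len(pattern)):
--         for i in range(split_idx):
--             idx_lower = split_idx - i - 1
--             idx_upper = split_idx + i
--             if idx_lower >= 0 and idx_upper < len(pattern) and pattern[idx_lower] != pattern[idx_upper]:
--                 break
--         else:
--             return split_idx * 100
--
--     for split_idx in range(1, len(pattern[0])):
--         for i in range(split_idx):
--
--             idx_lower = split_idx - i - 1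
--             idx_upper = split_idx + i
--             if idx_lower < 0 or idx_upper >= len(pattern[0]):
--                 continue
--             col_lower = "".join(a[idx_lower] for a in pattern)
--             col_upper = "".join(a[idx_upper] for a in pattern)
--             if col_upper != col_lower:
--                 break
--         else:
--             return split_idx
--
--     return 0
-- ===== SOURCE B (Python) =====
-- def find_reflection(lines):
--     # split s is a mirror iff the even-length block anchored at the nearer edge
--     # (the first 2*s lines, or the last 2*(n-s) lines) reads the same reversed
--     n = len(lines)
--     for s in range(1, n):
--         if lines[s - 1] != lines[s]:
--             continue
--         block = lines[:2 * s] if 2 * s <= n else lines[2 * s - n:]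
--         if block == block[::-1]:
--             return s
--     return 0
--
--
-- def calc_notes(pattern):
--     rows = pattern.splitlines()
--     h = find_reflection(rows)
--     if h:
--         return h * 100
--     cols = ["".join(col) for col in zip(*rows)]
--     return find_reflection(cols)
-- ===== Notes on version B (the rewrite author's own statement) =====
-- stated objective: alternative
-- what changed: Replaces A's outward pairwise scans (per-pair index bounds tests, early break, columns re-joined inside the inner loop) by a palindrome characterization: a split s is a mirror iff the even-length block anchored at the nearer edge (lines[:2s] or lines[2s-n:]) equals its own reversal (after a cheap adjacent-pair guard), applied to the rows and then to a zip(*)-transposed column list built once.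
-- outside the precondition, e.g. on calc_notes('aa\naa\nb'): A returns 100, B returns 100; on calc_notes('a\n\n'): A returns 0, B returns 0
import Mathlib
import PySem

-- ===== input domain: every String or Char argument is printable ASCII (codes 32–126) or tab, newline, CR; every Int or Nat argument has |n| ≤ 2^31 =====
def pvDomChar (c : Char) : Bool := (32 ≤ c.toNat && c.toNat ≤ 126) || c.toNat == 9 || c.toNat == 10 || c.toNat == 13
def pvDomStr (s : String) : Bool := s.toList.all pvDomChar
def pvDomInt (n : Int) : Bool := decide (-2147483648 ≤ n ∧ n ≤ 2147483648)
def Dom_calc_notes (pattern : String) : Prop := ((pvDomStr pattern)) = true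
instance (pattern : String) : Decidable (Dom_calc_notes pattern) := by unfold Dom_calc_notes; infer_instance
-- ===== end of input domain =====

-- B replaces A's outward pairwise mirror scans by a palindrome test on the even-length block
-- anchored at the nearer edge, on the rows and on a transposed column list built once (alternative; same cost).

-- ===== PORT A =====
-- `"".join(a[idx] for a in pattern)`; within Pre_ every touched idx satisfies 0 ≤ idx < len(a)
def pvColA (lines : List (List Char)) (idx : Int) : List Char :=
  lines.map (fun a => (PySem.List.pyGet? a idx).getD ' ')

-- body of the inner horizontal loop: `true` = the `break` fires at index i
def pvHBreak (lines : List (List Char)) (s i : Nat) : Bool :=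
  let il : Int := (s : Int) - (i : Int) - 1
  let iu : Int := (s : Int) + (i : Int)
  decide (0 ≤ il) && decide (iu < (lines.length : Int)) &&
    ((PySem.List.pyGet? lines il).getD [] != (PySem.List.pyGet? lines iu).getD [])

-- `for i in range(split_idx): … else: return` — true iff the for-else completes without break
def pvHOk (lines : List (List Char)) (s : Nat) : Bool :=
  (List.range s).all (fun i => !pvHBreak lines s i)

-- body of the inner vertical loop: `true` = the `break` fires at index i (`continue` = false)
def pvVBreak (lines : List (List Char)) (w : Nat) (s i : Nat) : Bool :=
  let il : Int := (s : Int) - (i : Int) - 1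
  let iu : Int := (s : Int) + (i : Int)
  if il < 0 || (w : Int) ≤ iu then false
  else pvColA lines iu != pvColA lines il

def pvVOk (lines : List (List Char)) (w : Nat) (s : Nat) : Bool :=
  (List.range s).all (fun i => !pvVBreak lines w s i)

def calc_notes (pattern : String) : Int :=
  let lines := (PySem.Str.splitlines pattern).map String.toList
  -- for split_idx in range(1, len(pattern)): first split passing the inner loop's else
  match (List.range' 1 (lines.length - 1)).find? (pvHOk lines) with
  | some s => (s : Int) * 100
  | none =>
    -- len(pattern[0]); on empty input Python raises IndexError here (excluded by Pre_)
    let w := (lines.headD []).length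
    match (List.range' 1 (w - 1)).find? (pvVOk lines w) with
    | some s => (s : Int)
    | none => 0

-- ===== PORT B =====
-- the even-length block anchored at the nearer edge: lines[:2s] if 2s<=n else lines[2s-n:]
def pvBlock (lines : List (List Char)) (s : Nat) : List (List Char) :=
  if 2 * s ≤ lines.length then lines.take (2 * s) else lines.drop (2 * s - lines.length)

-- find_reflection(lines): first s in 1..n-1 whose adjacent pair matches and whose edge block is a palindrome
def pvRefl (lines : List (List Char)) : Nat :=
  match (List.range' 1 (lines.length - 1)).find?
      (fun s => (lines.getD (s - 1) [] == lines.getD s []) &&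
        (pvBlock lines s == (pvBlock lines s).reverse)) with
  | some s => s
  | none => 0

-- ["".join(col) for col in zip(*rows)] — zip(*) truncates to the shortest row
def pvCols (rows : List (List Char)) : List (List Char) :=
  let m := ((rows.map List.length).min?).getD 0
  (List.range m).map (fun j => rows.map (fun r => r.getD j ' '))

def calc_notes_alt (pattern : String) : Int :=
  let rows := (PySem.Str.splitlines pattern).map String.toList
  let h := pvRefl rows
  if h ≠ 0 then (h : Int) * 100
  else ((pvRefl (pvCols rows) : Nat) : Int)

-- ===== PRECONDITION & SPEC =====
-- Pre_ excludes the empty pattern, where A raises IndexError at pattern[0], and patterns whose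
-- first line is longer than some other line, where A's on-the-fly column joins index every row
-- at positions up to len(row0)-1 and in general raise IndexError (on the corner inputs of this
-- ragged kind where A does return, B returns the same value — see the claim's cites).
def Pre_calc_notes (pattern : String) : Prop :=
  let lines := (PySem.Str.splitlines pattern).map String.toList
  lines ≠ [] ∧ ∀ r ∈ lines, (lines.headD []).length ≤ r.length
instance (pattern : String) : Decidable (Pre_calc_notes pattern) := by
  unfold Pre_calc_notes; infer_instance

def pvWitness_calc_notes : String := "#.\n#."

def Spec_calc_notes (pattern : String) (out : Int) : Prop := out = calc_notes_alt pattern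
instance (pattern : String) (out : Int) : Decidable (Spec_calc_notes pattern out) := by
  unfold Spec_calc_notes; infer_instance

-- ===== CLAIM (what is proved, stated in full; the proofs are below) =====
def Claim_equal_calc_notes : Prop := ∀ (pattern : String), Dom_calc_notes pattern → Pre_calc_notes pattern → Spec_calc_notes pattern (calc_notes pattern)

-- ===== LEMMAS AND PROOFS =====

theorem pv_find?_congr (l : List Nat) (p q : Nat → Bool) (h : ∀ x ∈ l, p x = q x) :
    l.find? p = l.find? q := by
  induction l with
  | nil => rfl
  | cons a t ih =>
    rw [List.find?_cons, List.find?_cons, h a (List.mem_cons_self ..)]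
    cases q a
    · exact ih fun x hx => h x (List.mem_cons_of_mem _ hx)
    · rfl

theorem pv_pyGetD {α : Type} [Inhabited α] (L : List α) (m : Nat) (d : α) :
    (PySem.List.pyGet? L (m : Int)).getD d = L.getD m d := by
  simp [List.getD_eq_getElem?_getD]

-- a list equals its reverse iff symmetric positions agree
theorem pv_pal_iff (L : List (List Char)) :
    ((L == L.reverse) = true) ↔
      ∀ j, j < L.length → L.getD j [] = L.getD (L.length - 1 - j) [] := by
  rw [beq_iff_eq]
  constructor
  · intro h j hj
    have h2 : L.length - 1 - j < L.length := by omega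
    have hrev : L.getD j [] = L.reverse.getD j [] := by conv_lhs => rw [h]
    rw [hrev, List.getD_eq_getElem _ _ (by simpa using hj), List.getElem_reverse,
      List.getD_eq_getElem _ _ h2]
  · intro h
    apply List.ext_getElem (by simp)
    intro j h1 h2
    rw [List.getElem_reverse]
    have := h j h1
    rw [List.getD_eq_getElem _ _ h1, List.getD_eq_getElem _ _ (by omega)] at this
    exact this

-- B's edge-block palindrome test coincides with A's symmetric-pair condition
theorem pv_block_iff (L : List (List Char)) (s : Nat) (h1 : 1 ≤ s) (h2 : s < L.length) :
    ((pvBlock L s == (pvBlock L s).reverse) = true) ↔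
      ∀ i, i < s → s + i < L.length → L.getD (s - 1 - i) [] = L.getD (s + i) [] := by
  unfold pvBlock
  split_ifs with hcase
  · -- block = L.take (2*s), length 2*s
    have hlen : (L.take (2 * s)).length = 2 * s := by simp; omega
    have hget : ∀ j, j < 2 * s → (L.take (2 * s)).getD j [] = L.getD j [] := by
      intro j hj
      rw [List.getD_eq_getElem _ _ (by omega), List.getElem_take,
          List.getD_eq_getElem _ _ (by omega)]
    rw [pv_pal_iff, hlen]
    constructor
    · intro h i hi hn
      have := h (s - 1 - i) (by omega)
      rw [hget _ (by omega), hget _ (by omega)] at this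
      have he : 2 * s - 1 - (s - 1 - i) = s + i := by omega
      rw [he] at this; exact this
    · intro h j hj
      rw [hget _ hj, hget _ (by omega)]
      by_cases hjs : j < s
      · have := h (s - 1 - j) (by omega) (by omega)
        have e1 : s - 1 - (s - 1 - j) = j := by omega
        have e2 : s + (s - 1 - j) = 2 * s - 1 - j := by omega
        rw [e1, e2] at this; exact this
      · have := h (j - s) (by omega) (by omega)
        have e1 : s - 1 - (j - s) = 2 * s - 1 - j := by omega
        have e2 : s + (j - s) = j := by omega
        rw [e1, e2] at this; exact this.symm
  · -- block = L.drop (2*s - n), length 2*(n - s)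
    have hn := L.length
    have hlen : (L.drop (2 * s - L.length)).length = 2 * (L.length - s) := by simp; omega
    have hget : ∀ j, j < 2 * (L.length - s) →
        (L.drop (2 * s - L.length)).getD j [] = L.getD (2 * s - L.length + j) [] := by
      intro j hj
      rw [List.getD_eq_getElem _ _ (by omega), List.getElem_drop,
          List.getD_eq_getElem _ _ (by omega)]
    rw [pv_pal_iff, hlen]
    constructor
    · intro h i hi hn'
      have hi' : i < L.length - s := by omega
      have := h (L.length - s - 1 - i) (by omega)
      rw [hget _ (by omega), hget _ (by omega)] at this
      have e1 : 2 * s - L.length + (L.length - s - 1 - i) = s - 1 - i := by omega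
      have e2 : 2 * s - L.length + (2 * (L.length - s) - 1 - (L.length - s - 1 - i)) = s + i := by omega
      rw [e1, e2] at this; exact this
    · intro h j hj
      rw [hget _ hj, hget _ (by omega)]
      by_cases hjs : j < L.length - s
      · have := h (L.length - s - 1 - j) (by omega) (by omega)
        have e1 : s - 1 - (L.length - s - 1 - j) = 2 * s - L.length + j := by omega
        have e2 : s + (L.length - s - 1 - j) = 2 * s - L.length + (2 * (L.length - s) - 1 - j) := by omega
        rw [e1, e2] at this; exact this
      · have := h (j - (L.length - s)) (by omega) (by omega)
        have e1 : s - 1 - (j - (L.length - s)) = 2 * s - L.length + (2 * (L.length - s) - 1 - j) := by omega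
        have e2 : s + (j - (L.length - s)) = 2 * s - L.length + j := by omega
        rw [e1, e2] at this; exact this.symm

-- B's guarded predicate: the adjacent-pair guard is the i = 0 instance of the condition
theorem pv_guard_iff (L : List (List Char)) (s : Nat) (h1 : 1 ≤ s) (h2 : s < L.length) :
    ((((L.getD (s - 1) [] == L.getD s []) &&
        (pvBlock L s == (pvBlock L s).reverse)) = true)) ↔
      ∀ i, i < s → s + i < L.length → L.getD (s - 1 - i) [] = L.getD (s + i) [] := by
  rw [Bool.and_eq_true, pv_block_iff L s h1 h2, beq_iff_eq]
  constructor
  · exact fun h => h.2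
  · intro h
    refine ⟨?_, h⟩
    have := h 0 (by omega) (by omega)
    simpa using this

-- characterization of A's horizontal inner loop
theorem pv_hOk_iff (L : List (List Char)) (s : Nat) :
    (pvHOk L s = true) ↔
      ∀ i, i < s → s + i < L.length → L.getD (s - 1 - i) [] = L.getD (s + i) [] := by
  unfold pvHOk pvHBreak
  rw [List.all_eq_true]
  constructor
  · intro h i hi hn
    have := h i (List.mem_range.mpr hi)
    simp only [Bool.not_eq_eq_eq_not, Bool.not_true, Bool.and_eq_false_iff,
      decide_eq_false_iff_not, bne_eq_false_iff_eq, not_le, not_lt] at this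
    have hc1 : ((s : Int) - i - 1) = ((s - 1 - i : Nat) : Int) := by omega
    have hc2 : ((s : Int) + i) = ((s + i : Nat) : Int) := by omega
    rcases this with h' | h'
    · rcases h' with h' | h' <;> omega
    · rw [hc1, hc2, pv_pyGetD, pv_pyGetD] at h'
      exact h'
  · intro h i hi
    have hi' := List.mem_range.mp hi
    have hc1 : ((s : Int) - i - 1) = ((s - 1 - i : Nat) : Int) := by omega
    have hc2 : ((s : Int) + i) = ((s + i : Nat) : Int) := by omega
    simp only [Bool.not_eq_eq_eq_not, Bool.not_true, Bool.and_eq_false_iff,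
      decide_eq_false_iff_not, bne_eq_false_iff_eq, not_le, not_lt]
    by_cases hn : s + i < L.length
    · right
      rw [hc1, hc2, pv_pyGetD, pv_pyGetD]
      exact h i hi' hn
    · left; right; omega

-- characterization of A's vertical inner loop
theorem pv_vOk_iff (L : List (List Char)) (w s : Nat) :
    (pvVOk L w s = true) ↔
      ∀ i, i < s → s + i < w →
        pvColA L ((s - 1 - i : Nat) : Int) = pvColA L ((s + i : Nat) : Int) := by
  unfold pvVOk pvVBreak
  rw [List.all_eq_true]
  constructor
  · intro h i hi hw
    have := h i (List.mem_range.mpr hi)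
    have hc : ¬((s : Int) - i - 1 < 0 ∨ (w : Int) ≤ (s : Int) + i) := by omega
    rw [if_neg (by simpa using hc)] at this
    simp only [Bool.not_eq_eq_eq_not, Bool.not_true, bne_eq_false_iff_eq] at this
    have hc1 : ((s : Int) - i - 1) = ((s - 1 - i : Nat) : Int) := by omega
    have hc2 : ((s : Int) + i) = ((s + i : Nat) : Int) := by omega
    rw [hc1, hc2] at this
    exact this.symm
  · intro h i hi
    have hi' := List.mem_range.mp hi
    by_cases hw : s + i < w
    · have hc : ¬((s : Int) - i - 1 < 0 ∨ (w : Int) ≤ (s : Int) + i) := by omega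
      rw [if_neg (by simpa using hc)]
      simp only [Bool.not_eq_eq_eq_not, Bool.not_true, bne_eq_false_iff_eq]
      have hc1 : ((s : Int) - i - 1) = ((s - 1 - i : Nat) : Int) := by omega
      have hc2 : ((s : Int) + i) = ((s + i : Nat) : Int) := by omega
      rw [hc1, hc2]
      exact (h i hi' hw).symm
    · rw [if_pos (by simp; omega)]
      simp

-- the transposed column list under Pre_: length and elements
theorem pv_min_eq (r0 : List Char) (rest : List (List Char))
    (hall : ∀ r ∈ r0 :: rest, r0.length ≤ r.length) :
    (((r0 :: rest).map List.length).min?).getD 0 = r0.length := by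
  have : ((r0 :: rest).map List.length).min? = some r0.length := by
    rw [List.min?_eq_some_iff]
    constructor
    · exact List.mem_map_of_mem (List.mem_cons_self ..)
    · intro b hb
      obtain ⟨r, hr, rfl⟩ := List.mem_map.mp hb
      exact hall r hr
  rw [this]; rfl

theorem pv_cols_spec (rows : List (List Char)) (hne : rows ≠ [])
    (hall : ∀ r ∈ rows, (rows.headD []).length ≤ r.length) :
    (pvCols rows).length = (rows.headD []).length ∧
      ∀ j, j < (rows.headD []).length →
        (pvCols rows).getD j [] = pvColA rows (j : Int) := by
  obtain ⟨r0, rest, rfl⟩ : ∃ r0 rest, rows = r0 :: rest := by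
    cases rows with
    | nil => exact absurd rfl hne
    | cons a t => exact ⟨a, t, rfl⟩
  have hmin : (((r0 :: rest).map List.length).min?).getD 0 = r0.length :=
    pv_min_eq r0 rest (by simpa using hall)
  unfold pvCols
  rw [hmin]
  refine ⟨by simp, ?_⟩
  intro j hj
  rw [List.getD_eq_getElem _ _ (by simpa using hj), List.getElem_map, List.getElem_range]
  unfold pvColA
  apply List.map_congr_left
  intro a ha
  have hla : r0.length ≤ a.length := by simpa using hall a ha
  have hj' : j < r0.length := by simpa using hj
  rw [PySem.List.pyGet?_natCast, List.getD_eq_getElem _ _ (by omega),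
    List.getElem?_eq_getElem (by omega)]
  rfl

theorem pv_main (pattern : String) (hpre : Pre_calc_notes pattern) :
    calc_notes pattern = calc_notes_alt pattern := by
  obtain ⟨hne, hall⟩ := hpre
  set lines := (PySem.Str.splitlines pattern).map String.toList with hl
  set w := (lines.headD []).length with hw
  -- horizontal: the two find?s coincide
  have hfh : (List.range' 1 (lines.length - 1)).find? (pvHOk lines) =
      (List.range' 1 (lines.length - 1)).find?
        (fun s => (lines.getD (s - 1) [] == lines.getD s []) &&
          (pvBlock lines s == (pvBlock lines s).reverse)) := by
    apply pv_find?_congr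
    intro s hs
    have hb := List.mem_range'_1.mp hs
    rw [Bool.eq_iff_iff, pv_hOk_iff, pv_guard_iff lines s (by omega) (by omega)]
  -- vertical: columns list and the two find?s coincide
  have hcs := pv_cols_spec lines hne hall
  have hclen : (pvCols lines).length = w := hcs.1
  have hfv : (List.range' 1 (w - 1)).find? (pvVOk lines w) =
      (List.range' 1 ((pvCols lines).length - 1)).find?
        (fun s => ((pvCols lines).getD (s - 1) [] == (pvCols lines).getD s []) &&
          (pvBlock (pvCols lines) s == (pvBlock (pvCols lines) s).reverse)) := by
    rw [hclen]
    apply pv_find?_congr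
    intro s hs
    have hb := List.mem_range'_1.mp hs
    rw [Bool.eq_iff_iff, pv_vOk_iff,
      pv_guard_iff (pvCols lines) s (by omega) (by rw [hclen]; omega), hclen]
    constructor
    · intro h i hi hn
      rw [hcs.2 _ (by omega), hcs.2 _ (by omega)]
      exact h i hi hn
    · intro h i hi hn
      have := h i hi hn
      rw [hcs.2 _ (by omega), hcs.2 _ (by omega)] at this
      exact this
  have hA : calc_notes pattern =
      (match (List.range' 1 (lines.length - 1)).find? (pvHOk lines) with
       | some s => (s : Int) * 100
       | none =>
         match (List.range' 1 (w - 1)).find? (pvVOk lines w) with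
         | some s => (s : Int)
         | none => 0) := rfl
  have hB : calc_notes_alt pattern =
      (if pvRefl lines ≠ 0 then ((pvRefl lines : Nat) : Int) * 100
       else ((pvRefl (pvCols lines) : Nat) : Int)) := rfl
  rw [hA, hB, hfh]
  cases hfind : (List.range' 1 (lines.length - 1)).find?
      (fun s => (lines.getD (s - 1) [] == lines.getD s []) &&
        (pvBlock lines s == (pvBlock lines s).reverse)) with
  | some s =>
    have hmem := List.mem_range'_1.mp (List.mem_of_find?_eq_some hfind)
    have hr : pvRefl lines = s := by unfold pvRefl; rw [hfind]
    rw [hr, if_pos (by omega : s ≠ 0)]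
  | none =>
    have hr : pvRefl lines = 0 := by unfold pvRefl; rw [hfind]
    rw [hr, if_neg (by simp)]
    rw [hfv]
    cases hfind2 : (List.range' 1 ((pvCols lines).length - 1)).find?
        (fun s => ((pvCols lines).getD (s - 1) [] == (pvCols lines).getD s []) &&
          (pvBlock (pvCols lines) s == (pvBlock (pvCols lines) s).reverse)) with
    | some s =>
      have hr2 : pvRefl (pvCols lines) = s := by unfold pvRefl; rw [hfind2]
      rw [hr2]
    | none =>
      have hr2 : pvRefl (pvCols lines) = 0 := by unfold pvRefl; rw [hfind2]
      rw [hr2]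
      simp

-- ===== VERDICT (by name: the statement is the Claim_ definition above) =====
theorem calc_notes_spec : Claim_equal_calc_notes := by
  intro pattern _ hpre
  unfold Spec_calc_notes
  exact pv_main pattern hpre
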